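-- pv_equiv track=rewrite | github.com/0bliv/Codeforce | A/A. I_love_%username%.py | count_amazing_performances
-- ===== SOURCE A (Python) =====
-- def count_amazing_performances(n, points):
--     # Initialize variables to store best and worst performances
--     best_performance = points[0]
--     worst_performance = points[0]
--     amazing_count = 0
--
--     # Iterate through the points
--     for i in range(1, n):
--         # Check if the current performance is amazing
--         if points[i] > best_performance:
--             best_performance = points[i]
--             amazing_count += 1
--         elif points[i] < worst_performance:
--             worst_performance = points[i]
--             amazing_count += 1
--
--     return amazing_count
-- ===== SOURCE B (Python) =====
-- def count_amazing_performances(n, points):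
--     # Prefix max/min tables over the first n points, then one counting pass.
--     pre = points[:n]
--     maxs = []
--     mins = []
--     for p in pre:
--         maxs.append(p if not maxs or p > maxs[-1] else maxs[-1])
--         mins.append(p if not mins or p < mins[-1] else mins[-1])
--     count = 0
--     for i in range(1, n):
--         if points[i] > maxs[i - 1] or points[i] < mins[i - 1]:
--             count += 1
--     return count
-- ===== Notes on version B (the rewrite author's own statement) =====
-- stated objective: alternative
-- what changed: Replaces A's single stateful loop carrying running best/worst with precomputed prefix-max/prefix-min tables built in one pass, followed by a separate stateless counting pass comparing each element against the table entries at i-1.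
import Mathlib
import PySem

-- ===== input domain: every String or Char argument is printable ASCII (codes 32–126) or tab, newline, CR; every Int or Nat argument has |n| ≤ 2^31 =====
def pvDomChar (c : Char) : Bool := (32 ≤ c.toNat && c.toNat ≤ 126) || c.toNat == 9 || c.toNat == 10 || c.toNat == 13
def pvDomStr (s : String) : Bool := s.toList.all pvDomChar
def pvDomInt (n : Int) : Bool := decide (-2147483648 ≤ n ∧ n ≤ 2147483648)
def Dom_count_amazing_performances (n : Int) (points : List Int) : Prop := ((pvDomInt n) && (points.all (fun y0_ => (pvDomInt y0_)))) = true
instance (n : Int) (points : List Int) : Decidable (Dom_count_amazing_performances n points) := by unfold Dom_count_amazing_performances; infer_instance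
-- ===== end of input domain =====

-- B replaces A's single stateful running best/worst loop by prefix-max/min tables plus a separate counting pass (alternative decomposition, same cost).


-- ===== PORT A =====
def count_amazing_performances (n : Int) (points : List Int) : Int :=
  let best := PySem.List.pyGetD points 0 0       -- points[0]; in range under Pre_
  let worst := PySem.List.pyGetD points 0 0
  let s := (PySem.List.pyRange 1 n).foldl
    (fun (st : Int × Int × Int) i =>
      let p := PySem.List.pyGetD points i 0      -- points[i]; in range under Pre_
      if p > st.1 then (p, st.2.1, st.2.2 + 1)
      else if p < st.2.1 then (st.1, p, st.2.2 + 1)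
      else st)
    (best, worst, 0)
  s.2.2

-- ===== PORT B =====
def count_amazing_performances_alt (n : Int) (points : List Int) : Int :=
  let pre := PySem.List.slice points none (some n)                 -- points[:n]
  let mm := pre.foldl
    (fun (st : List Int × List Int) p =>
      let mx := match st.1.getLast? with | none => p | some m => if p > m then p else m
      let mn := match st.2.getLast? with | none => p | some m => if p < m then p else m
      (st.1 ++ [mx], st.2 ++ [mn]))
    ([], [])
  (PySem.List.pyRange 1 n).foldl
    (fun c i =>
      if PySem.List.pyGetD points i 0 > PySem.List.pyGetD mm.1 (i - 1) 0 ∨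
         PySem.List.pyGetD points i 0 < PySem.List.pyGetD mm.2 (i - 1) 0
      then c + 1 else c)
    0

-- ===== PRECONDITION & SPEC =====
-- Pre_ = exactly the inputs where the Python A returns: points nonempty and n ≤ len(points) (otherwise A raises IndexError).
def Pre_count_amazing_performances (n : Int) (points : List Int) : Prop :=
  points ≠ [] ∧ n ≤ points.length
instance (n : Int) (points : List Int) : Decidable (Pre_count_amazing_performances n points) := by
  unfold Pre_count_amazing_performances; infer_instance

def pvWitness_count_amazing_performances : Int × List Int := (3, [1, 0, 2])

def Spec_count_amazing_performances (n : Int) (points : List Int) (out : Int) : Prop :=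
  out = count_amazing_performances_alt n points
instance (n : Int) (points : List Int) (out : Int) : Decidable (Spec_count_amazing_performances n points out) := by
  unfold Spec_count_amazing_performances; infer_instance

-- ===== CLAIM (what is proved, stated in full; the proofs are below) =====
def Claim_equal_count_amazing_performances : Prop := ∀ (n : Int) (points : List Int), Dom_count_amazing_performances n points → Pre_count_amazing_performances n points → Spec_count_amazing_performances n points (count_amazing_performances n points)

-- ===== LEMMAS AND PROOFS =====

-- running "if p > m then p else m" scan (what B's maxs table tail is)
def pvSMax (m : Int) : List Int → List Int
  | [] => []
  | p :: t => (if p > m then p else m) :: pvSMax (if p > m then p else m) t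

def pvSMin (m : Int) : List Int → List Int
  | [] => []
  | p :: t => (if p < m then p else m) :: pvSMin (if p < m then p else m) t

-- B's table-building fold, characterised
lemma pv_build_fold (l : List Int) : ∀ (a1 a2 : List Int) (m1 m2 : Int),
    a1.getLast? = some m1 → a2.getLast? = some m2 →
    l.foldl (fun (st : List Int × List Int) p =>
      (st.1 ++ [match st.1.getLast? with | none => p | some m => if p > m then p else m],
       st.2 ++ [match st.2.getLast? with | none => p | some m => if p < m then p else m])) (a1, a2)
    = (a1 ++ pvSMax m1 l, a2 ++ pvSMin m2 l) := by
  induction l with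
  | nil => intro a1 a2 m1 m2 h1 h2; simp [pvSMax, pvSMin]
  | cons p t ih =>
    intro a1 a2 m1 m2 h1 h2
    simp only [List.foldl_cons, h1, h2]
    rw [ih (a1 ++ [if p > m1 then p else m1]) (a2 ++ [if p < m2 then p else m2]) _ _
        List.getLast?_concat List.getLast?_concat]
    simp [pvSMax, pvSMin]

lemma pv_build_from_nil (p0 : Int) (rest : List Int) :
    (p0 :: rest).foldl (fun (st : List Int × List Int) p =>
      (st.1 ++ [match st.1.getLast? with | none => p | some m => if p > m then p else m],
       st.2 ++ [match st.2.getLast? with | none => p | some m => if p < m then p else m])) ([], [])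
    = (p0 :: pvSMax p0 rest, p0 :: pvSMin p0 rest) := by
  simp only [List.foldl_cons, List.getLast?_nil, List.nil_append]
  rw [pv_build_fold rest [p0] [p0] p0 p0 rfl rfl]
  simp

-- indexing the table = running fold over the prefix
lemma pv_smax_getD (rest : List Int) : ∀ (k : Nat) (p0 : Int), k ≤ rest.length →
    (p0 :: pvSMax p0 rest).getD k 0 = (rest.take k).foldl (fun m p => if p > m then p else m) p0 := by
  induction rest with
  | nil =>
    intro k p0 hk
    have hk0 : k = 0 := by simpa using hk
    subst hk0
    simp
  | cons r t ih =>
    intro k p0 hk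
    cases k with
    | zero => simp
    | succ k =>
      simp only [pvSMax, List.take_succ_cons, List.foldl_cons]
      have := ih k (if r > p0 then r else p0) (by simpa using hk)
      simpa [List.getD] using this

lemma pv_smin_getD (rest : List Int) : ∀ (k : Nat) (p0 : Int), k ≤ rest.length →
    (p0 :: pvSMin p0 rest).getD k 0 = (rest.take k).foldl (fun m p => if p < m then p else m) p0 := by
  induction rest with
  | nil =>
    intro k p0 hk
    have hk0 : k = 0 := by simpa using hk
    subst hk0
    simp
  | cons r t ih =>
    intro k p0 hk
    cases k with
    | zero => simp
    | succ k =>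
      simp only [pvSMin, List.take_succ_cons, List.foldl_cons]
      have := ih k (if r < p0 then r else p0) (by simpa using hk)
      simpa [List.getD] using this

lemma pv_gfold_ge (l : List Int) : ∀ p0 : Int, p0 ≤ l.foldl (fun m p => if p > m then p else m) p0 := by
  induction l with
  | nil => intro p0; simp
  | cons r t ih =>
    intro p0
    simp only [List.foldl_cons]
    calc p0 ≤ (if r > p0 then r else p0) := by split <;> omega
    _ ≤ _ := ih _

lemma pv_hfold_le (l : List Int) : ∀ p0 : Int, l.foldl (fun m p => if p < m then p else m) p0 ≤ p0 := by
  induction l with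
  | nil => intro p0; simp
  | cons r t ih =>
    intro p0
    simp only [List.foldl_cons]
    calc t.foldl (fun m p => if p < m then p else m) (if r < p0 then r else p0)
        ≤ (if r < p0 then r else p0) := ih _
    _ ≤ p0 := by split <;> omega

lemma pv_prefix_getD (l m : List Int) (h : l <+: m) (k : Nat) (hk : k < l.length) :
    m.getD k 0 = l.getD k 0 := by
  rcases h with ⟨t, rfl⟩
  simp [List.getD, List.getElem?_append_left hk]

-- the joint loop invariant: A's state components are the prefix max/min and both counters agree
lemma pv_main (p0 : Int) (rest rest' : List Int) (hpre : rest' <+: rest) :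
    ∀ k : Nat, k ≤ rest'.length →
    ∃ C : Int,
      (PySem.List.pyRange 1 (1 + (k : Int))).foldl
        (fun (st : Int × Int × Int) i =>
          if PySem.List.pyGetD (p0 :: rest) i 0 > st.1 then
            (PySem.List.pyGetD (p0 :: rest) i 0, st.2.1, st.2.2 + 1)
          else if PySem.List.pyGetD (p0 :: rest) i 0 < st.2.1 then
            (st.1, PySem.List.pyGetD (p0 :: rest) i 0, st.2.2 + 1)
          else st) (p0, p0, 0)
      = ((rest'.take k).foldl (fun m p => if p > m then p else m) p0,
         (rest'.take k).foldl (fun m p => if p < m then p else m) p0, C)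
      ∧ (PySem.List.pyRange 1 (1 + (k : Int))).foldl
        (fun c i =>
          if PySem.List.pyGetD (p0 :: rest) i 0 > PySem.List.pyGetD (p0 :: pvSMax p0 rest') (i - 1) 0 ∨
             PySem.List.pyGetD (p0 :: rest) i 0 < PySem.List.pyGetD (p0 :: pvSMin p0 rest') (i - 1) 0
          then c + 1 else c) 0 = C := by
  intro k
  induction k with
  | zero =>
    intro _
    exact ⟨0, by simp [PySem.List.pyRange_one_eq_nil]⟩
  | succ k ih =>
    intro hk
    obtain ⟨C, hA, hB⟩ := ih (by omega)
    have hrange : PySem.List.pyRange 1 (1 + ((k + 1 : Nat) : Int))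
        = PySem.List.pyRange 1 (1 + (k : Int)) ++ [1 + (k : Int)] := by
      push_cast
      rw [show (1 : Int) + ((k : Int) + 1) = (1 + (k : Int)) + 1 by ring]
      exact PySem.List.pyRange_one_succ_right (by omega)
    have hklt : k < rest'.length := by omega
    have hp : PySem.List.pyGetD (p0 :: rest) (1 + (k : Int)) 0 = rest'.getD k 0 := by
      rw [show (1 : Int) + (k : Int) = ((k + 1 : Nat) : Int) by push_cast; ring,
          PySem.List.pyGetD_natCast, List.getD_cons_succ]
      exact pv_prefix_getD rest' rest hpre k hklt
    have hmx : PySem.List.pyGetD (p0 :: pvSMax p0 rest') ((1 + (k : Int)) - 1) 0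
        = (rest'.take k).foldl (fun m p => if p > m then p else m) p0 := by
      rw [show (1 : Int) + (k : Int) - 1 = ((k : Nat) : Int) by push_cast; ring,
          PySem.List.pyGetD_natCast]
      exact pv_smax_getD rest' k p0 (by omega)
    have hmn : PySem.List.pyGetD (p0 :: pvSMin p0 rest') ((1 + (k : Int)) - 1) 0
        = (rest'.take k).foldl (fun m p => if p < m then p else m) p0 := by
      rw [show (1 : Int) + (k : Int) - 1 = ((k : Nat) : Int) by push_cast; ring,
          PySem.List.pyGetD_natCast]
      exact pv_smin_getD rest' k p0 (by omega)
    have htake : rest'.take (k + 1) = rest'.take k ++ [rest'.getD k 0] := by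
      rw [List.take_add_one]
      simp [List.getD, List.getElem?_eq_getElem hklt]
    set M := (rest'.take k).foldl (fun m p => if p > m then p else m) p0 with hM
    set W := (rest'.take k).foldl (fun m p => if p < m then p else m) p0 with hW
    have hWM : W ≤ M := le_trans (pv_hfold_le _ p0) (pv_gfold_ge _ p0)
    set p := rest'.getD k 0 with hpdef
    refine ⟨if p > M ∨ p < W then C + 1 else C, ?_, ?_⟩
    · rw [hrange, List.foldl_append, hA]
      simp only [List.foldl_cons, List.foldl_nil, hp, htake, List.foldl_append]
      simp only [← hM, ← hW]
      split_ifs <;> first | rfl | omega | (exfalso; omega)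
    · rw [hrange, List.foldl_append, hB]
      simp only [List.foldl_cons, List.foldl_nil, hp, hmx, hmn]

-- ===== VERDICT (by name: the statement is the Claim_ definition above) =====
theorem count_amazing_performances_spec : Claim_equal_count_amazing_performances := by
  intro n points _ hpre
  obtain ⟨hne, hlen⟩ := hpre
  unfold Spec_count_amazing_performances
  obtain ⟨p0, rest, rfl⟩ : ∃ p0 rest, points = p0 :: rest := by
    cases points with
    | nil => exact absurd rfl hne
    | cons a t => exact ⟨a, t, rfl⟩
  by_cases hn : n ≤ 1
  · unfold count_amazing_performances count_amazing_performances_alt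
    simp [PySem.List.pyRange_one_eq_nil hn]
  · push Not at hn
    set rest' : List Int := rest.take (n - 1).toNat with hrest'
    have hlr : rest'.length = (n - 1).toNat := by
      rw [hrest', List.length_take]
      simp at hlen
      omega
    have hn1 : (1 : Int) + ((n - 1).toNat : Int) = n := by omega
    obtain ⟨C, hA, hB⟩ := pv_main p0 rest rest' (List.take_prefix _ _) (n - 1).toNat (by omega)
    rw [hn1] at hA hB
    have hpre_slice : PySem.List.slice (p0 :: rest) none (some n) = p0 :: rest' := by
      rw [PySem.List.slice_to (p0 :: rest) (b := n) (by omega)]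
      rw [show n.toNat = (n - 1).toNat + 1 by omega]
      simp [hrest']
    unfold count_amazing_performances count_amazing_performances_alt
    simp only [hpre_slice, pv_build_from_nil, PySem.List.pyGetD_zero_cons]
    rw [hA, hB]
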